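-- pv_equiv track=rewrite | github.com/Vishnu070501/DSA | dp/stairs_path.py | stairs_path_tabulation_opt
-- ===== SOURCE A (Python) =====
-- def stairs_path_tabulation_opt(start, end):
--     # Space Optimization: Just like in Fibonacci, we only ever need the paths from the
--     # exact next step (i+1) and the step after that (i+2) to calculate paths for step 'i'.
--     # We do NOT need to maintain an entire array of size 'end+1'.
--
--     if start == end:
--         return [[]]
--
--     # 'next_step' initially holds paths from 'end' to 'end'
--     next_step = [[]]
--     # 'next_next_step' initially holds paths from 'end+1' (which is out of bounds, so empty)
--     next_next_step = []
--
--     current_step = []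
--
--     for i in range(end - 1, start - 1, -1):
--         # 1. Take a 1-step leap: prepend 1 to paths starting from the immediate next stair
--         paths_1_step = [[1, *path] for path in next_step]
--
--         # 2. Take a 2-step leap: prepend 2 to paths starting from two stairs down
--         paths_2_step = [[2, *path] for path in next_next_step]
--
--         current_step = paths_1_step + paths_2_step
--
--         # Shift our state windows backward for the next iteration
--         next_next_step = next_step
--         next_step = current_step
--
--     return current_step
-- ===== SOURCE B (Python) =====
-- def stairs_path_tabulation_opt(start, end):
--     # Forward recursion on the stair index instead of backward tabulation.
--     def rec(pos):
--         if pos == end: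
--             return [[]]
--         if pos > end:
--             return []
--         return [[1, *p] for p in rec(pos + 1)] + [[2, *p] for p in rec(pos + 2)]
--     return rec(start)
-- ===== Notes on version B (the rewrite author's own statement) =====
-- stated objective: simpler
-- what changed: Replaced the backward two-list sliding-window tabulation loop with a direct forward recursion on the stair index that branches on 1-step and 2-step moves.
import Mathlib
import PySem

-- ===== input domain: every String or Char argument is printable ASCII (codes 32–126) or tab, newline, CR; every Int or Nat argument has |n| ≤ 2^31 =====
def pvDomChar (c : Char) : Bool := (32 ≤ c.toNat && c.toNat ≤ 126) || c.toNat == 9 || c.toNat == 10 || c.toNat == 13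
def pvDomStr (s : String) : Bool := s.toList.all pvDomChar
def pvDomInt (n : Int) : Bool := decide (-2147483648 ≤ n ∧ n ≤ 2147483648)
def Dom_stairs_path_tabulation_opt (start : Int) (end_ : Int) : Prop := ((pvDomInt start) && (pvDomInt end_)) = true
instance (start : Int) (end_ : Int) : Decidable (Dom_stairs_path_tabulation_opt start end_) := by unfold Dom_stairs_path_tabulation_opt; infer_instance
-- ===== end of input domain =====

-- B replaces A's backward sliding-window tabulation by a direct forward recursion on the
-- stair index (objective: simpler); same return value everywhere, no side effects.

-- ===== PORT A =====
def stairs_path_tabulation_opt (start : Int) (end_ : Int) : List (List Int) :=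
  if start = end_ then [[]]
  else
    -- state = (next_step, next_next_step, current_step)
    let final :=
      (PySem.List.pyRange (end_ - 1) (start - 1) (-1)).foldl
        (fun (st : List (List Int) × List (List Int) × List (List Int)) (_i : Int) =>
          let paths_1_step := st.1.map (fun path => 1 :: path)
          let paths_2_step := st.2.1.map (fun path => 2 :: path)
          let current_step := paths_1_step ++ paths_2_step
          (current_step, st.1, current_step))
        ([[]], [], [])
    final.2.2

-- ===== PORT B =====
def stairsRec (end_ : Int) (pos : Int) : List (List Int) :=
  if pos = end_ then [[]]
  else if pos > end_ then []
  else (stairsRec end_ (pos + 1)).map (fun p => 1 :: p)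
       ++ (stairsRec end_ (pos + 2)).map (fun p => 2 :: p)
termination_by (end_ - pos).toNat
decreasing_by all_goals omega

def stairs_path_tabulation_opt_alt (start : Int) (end_ : Int) : List (List Int) :=
  stairsRec end_ start

-- ===== PRECONDITION & SPEC =====
def Spec_stairs_path_tabulation_opt (start : Int) (end_ : Int) (out : List (List Int)) : Prop := out = stairs_path_tabulation_opt_alt start end_
instance (start : Int) (end_ : Int) (out : List (List Int)) : Decidable (Spec_stairs_path_tabulation_opt start end_ out) := by unfold Spec_stairs_path_tabulation_opt; infer_instance

-- ===== CLAIM (what is proved, stated in full; the proofs are below) =====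
def Claim_equal_stairs_path_tabulation_opt : Prop := ∀ (start : Int) (end_ : Int), Dom_stairs_path_tabulation_opt start end_ → Spec_stairs_path_tabulation_opt start end_ (stairs_path_tabulation_opt start end_)

-- ===== LEMMAS AND PROOFS =====

lemma stairsRec_step (e i : Int) (h : i < e) :
    stairsRec e i = (stairsRec e (i + 1)).map (fun p => 1 :: p)
      ++ (stairsRec e (i + 2)).map (fun p => 2 :: p) := by
  rw [stairsRec]
  rw [if_neg (by omega), if_neg (by omega)]

lemma loop_inv (e start : Int) (n : Nat) :
    ∀ (j : Int) (c : List (List Int)), j = start + n → j ≤ e →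
    (PySem.List.pyRange (j - 1) (start - 1) (-1)).foldl
      (fun (st : List (List Int) × List (List Int) × List (List Int)) (_i : Int) =>
        let paths_1_step := st.1.map (fun path => 1 :: path)
        let paths_2_step := st.2.1.map (fun path => 2 :: path)
        let current_step := paths_1_step ++ paths_2_step
        (current_step, st.1, current_step))
      (stairsRec e j, stairsRec e (j + 1), c)
    = (stairsRec e start, stairsRec e (start + 1),
       if n = 0 then c else stairsRec e start) := by
  induction n with
  | zero =>
    intro j c hj _
    have hjs : j = start := by omega
    subst hjs
    rw [PySem.List.pyRange_neg_one_eq_nil (by omega)]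
    simp
  | succ m ih =>
    intro j c hj hje
    rw [PySem.List.pyRange_neg_one_cons (by omega : start - 1 < j - 1)]
    rw [List.foldl_cons]
    have hstep : (stairsRec e j).map (fun p => 1 :: p)
        ++ (stairsRec e (j + 1)).map (fun p => 2 :: p) = stairsRec e (j - 1) := by
      rw [stairsRec_step e (j - 1) (by omega)]
      have h1 : j - 1 + 1 = j := by ring
      have h2 : j - 1 + 2 = j + 1 := by ring
      rw [h1, h2]
    show (PySem.List.pyRange (j - 1 - 1) (start - 1) (-1)).foldl _
        ((stairsRec e j).map (fun p => 1 :: p) ++ (stairsRec e (j + 1)).map (fun p => 2 :: p),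
         stairsRec e j,
         (stairsRec e j).map (fun p => 1 :: p) ++ (stairsRec e (j + 1)).map (fun p => 2 :: p)) = _
    rw [hstep]
    have ih' := ih (j - 1) (stairsRec e (j - 1)) (by omega) (by omega)
    have h1 : j - 1 + 1 = j := by ring
    rw [h1] at ih'
    rw [ih']
    by_cases hm : m = 0
    · have hjs : j - 1 = start := by omega
      simp [hm, hjs]
    · simp [hm]

-- ===== VERDICT (by name: the statement is the Claim_ definition above) =====
theorem stairs_path_tabulation_opt_spec : Claim_equal_stairs_path_tabulation_opt := by
  intro start end_ _
  unfold Spec_stairs_path_tabulation_opt stairs_path_tabulation_opt stairs_path_tabulation_opt_alt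
  by_cases h : start = end_
  · simp [h, stairsRec]
  · simp only [if_neg h]
    by_cases hle : start ≤ end_
    · have hlt : start < end_ := lt_of_le_of_ne hle h
      have hn : end_ = start + ((end_ - start).toNat : Int) := by omega
      have key := loop_inv end_ start (end_ - start).toNat end_ [] hn (le_refl _)
      have e1 : stairsRec end_ end_ = [[]] := by rw [stairsRec]; simp
      have e2 : stairsRec end_ (end_ + 1) = [] := by
        rw [stairsRec, if_neg (by omega), if_pos (by omega)]
      rw [e1, e2] at key
      simp only at key ⊢
      rw [key]
      have : (end_ - start).toNat ≠ 0 := by omega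
      simp [this]
    · rw [PySem.List.pyRange_neg_one_eq_nil (by omega)]
      rw [stairsRec, if_neg h, if_pos (by omega)]
      simp
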